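-- pv_equiv track=rewrite | github.com/LenaAQA/codewars | lesson_9/15.py | make_password
-- ===== SOURCE A (Python) =====
-- def make_password(phrase):
--     password = ""
--     for i in phrase.split():
--         i = i[0]
--         if i in "iI":
--             password += "1"
--         elif i in "oO":
--             password += "0"
--         elif i in "sS":
--             password += "5"
--         else:
--             password += i
--     return password
-- ===== SOURCE B (Python) =====
-- LEET = {'i': '1', 'I': '1', 'o': '0', 'O': '0', 's': '5', 'S': '5'}
--
-- def make_password(phrase):
--     out = []
--     prev_ws = True
--     for ch in phrase:
--         ws = ch.isspace()
--         if prev_ws and not ws: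
--             out.append(LEET.get(ch, ch))
--         prev_ws = ws
--     return ''.join(out)
-- ===== Notes on version B (the rewrite author's own statement) =====
-- stated objective: alternative
-- what changed: B never splits the phrase into words: it is a single character-level state machine that tracks whether the previous character was whitespace and emits the leet-mapped character exactly at each whitespace-to-word boundary, instead of A's split() loop that takes each word's first letter through an if/elif chain.
import Mathlib
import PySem

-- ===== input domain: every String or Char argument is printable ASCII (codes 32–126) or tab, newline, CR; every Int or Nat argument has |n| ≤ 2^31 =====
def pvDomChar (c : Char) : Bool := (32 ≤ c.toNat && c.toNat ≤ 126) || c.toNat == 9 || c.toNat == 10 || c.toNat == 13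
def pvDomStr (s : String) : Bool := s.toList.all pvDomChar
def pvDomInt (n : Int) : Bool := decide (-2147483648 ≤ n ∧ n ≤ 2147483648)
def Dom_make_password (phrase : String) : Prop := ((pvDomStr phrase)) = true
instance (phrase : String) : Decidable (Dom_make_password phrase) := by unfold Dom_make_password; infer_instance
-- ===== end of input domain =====

-- B replaces A's split()-into-words loop by a single character-level state machine
-- (boundary detection via a prev-whitespace flag); alternative algorithm, same cost.

-- ===== PORT A =====
-- A: loop over phrase.split(), take w[0] (cannot fail: split() yields nonempty words,
-- so the `none` branch is unreachable), branch per character, append.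
def make_password (phrase : String) : String :=
  String.ofList ((PySem.Str.split₀ phrase).foldl (fun password w =>
    match PySem.List.pyGet? w.toList 0 with
    | none => password
    | some c =>
      if c = 'i' ∨ c = 'I' then password ++ ['1']
      else if c = 'o' ∨ c = 'O' then password ++ ['0']
      else if c = 's' ∨ c = 'S' then password ++ ['5']
      else password ++ [c]) [])

-- ===== PORT B =====
-- the LEET dict of Source B
def pvLeetTable : PySem.Dict Char Char :=
  PySem.Dict.ofList [('i', '1'), ('I', '1'), ('o', '0'), ('O', '0'), ('s', '5'), ('S', '5')]

-- B: one pass over the characters with a prev-whitespace flag; at each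
-- whitespace→non-whitespace boundary append LEET.get(ch, ch).
def make_password_alt (phrase : String) : String :=
  String.ofList ((phrase.toList.foldl (fun (st : Bool × List Char) ch =>
    let ws := PySem.Chars.isspace ch
    (ws, if st.1 && !ws then st.2 ++ [PySem.Dict.getD pvLeetTable ch ch] else st.2))
    (true, [])).2)

-- ===== PRECONDITION & SPEC =====
def Spec_make_password (phrase : String) (out : String) : Prop := out = make_password_alt phrase
instance (phrase : String) (out : String) : Decidable (Spec_make_password phrase out) := by unfold Spec_make_password; infer_instance

-- ===== CLAIM =====
def Claim_equal_make_password : Prop := ∀ (phrase : String), Dom_make_password phrase → Spec_make_password phrase (make_password phrase)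

-- ===== LEMMAS AND PROOFS =====

-- common specification both programs are shown equal to: the leet-translated first
-- letters of the words of cs, with `p` = "previous character was whitespace or start"
def pvFirsts : List Char → Bool → List Char
  | [], _ => []
  | c :: cs, p =>
    if PySem.Chars.isspace c then pvFirsts cs true
    else (if p then [PySem.Dict.getD pvLeetTable c c] else []) ++ pvFirsts cs false

-- per-character: A's if/elif chain equals a lookup in B's table
theorem pvLeet_char (c : Char) :
    (if c = 'i' ∨ c = 'I' then '1'
     else if c = 'o' ∨ c = 'O' then '0'
     else if c = 's' ∨ c = 'S' then '5'
     else c) = PySem.Dict.getD pvLeetTable c c := by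
  have hitems : pvLeetTable.items =
      [('i', '1'), ('I', '1'), ('o', '0'), ('O', '0'), ('s', '5'), ('S', '5')] := by decide
  simp only [PySem.Dict.getD, PySem.Dict.get?, hitems]
  by_cases h1 : c = 'i'; · subst h1; decide
  by_cases h2 : c = 'I'; · subst h2; decide
  by_cases h3 : c = 'o'; · subst h3; decide
  by_cases h4 : c = 'O'; · subst h4; decide
  by_cases h5 : c = 's'; · subst h5; decide
  by_cases h6 : c = 'S'; · subst h6; decide
  simp [List.find?, h1, h2, h3, h4, h5, h6,
    show ('i' == c) = false by simp [Ne.symm h1],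
    show ('I' == c) = false by simp [Ne.symm h2],
    show ('o' == c) = false by simp [Ne.symm h3],
    show ('O' == c) = false by simp [Ne.symm h4],
    show ('s' == c) = false by simp [Ne.symm h5],
    show ('S' == c) = false by simp [Ne.symm h6]]

-- the translated first letters of a word list
def pvF (ws : List (List Char)) : List Char :=
  ws.flatMap (fun w => (w.head?.map (fun c => PySem.Dict.getD pvLeetTable c c)).toList)

-- split₀.go, seen through pvF, computes pvFirsts
theorem pvGo_firsts (cs : List Char) : ∀ cur acc,
    pvF (PySem.Chars.split₀.go cs cur acc)
      = pvF acc.reverse ++ pvF [cur.reverse] ++ pvFirsts cs cur.isEmpty := by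
  induction cs with
  | nil =>
    intro cur acc
    cases cur with
    | nil => simp [PySem.Chars.split₀.go, pvF, pvFirsts]
    | cons c cur' => simp [PySem.Chars.split₀.go, pvFirsts, pvF]
  | cons c rest ih =>
    intro cur acc
    by_cases hws : PySem.Chars.isspace c
    · cases cur with
      | nil =>
        simp only [PySem.Chars.split₀.go, hws, List.isEmpty_nil, if_true]
        rw [ih [] acc]
        simp [pvFirsts, hws]
      | cons d cur' =>
        rw [show PySem.Chars.split₀.go (c :: rest) (d :: cur') acc
              = PySem.Chars.split₀.go rest [] ((d :: cur').reverse :: acc) from by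
            simp [PySem.Chars.split₀.go, hws]]
        rw [ih [] ((d :: cur').reverse :: acc)]
        simp [pvFirsts, hws, pvF]
    · simp only [PySem.Chars.split₀.go, hws, if_false, Bool.false_eq_true]
      rw [ih (c :: cur) acc]
      cases cur with
      | nil => simp [pvFirsts, hws, pvF]
      | cons d cur' =>
        simp only [pvFirsts, hws, if_false, List.isEmpty_cons, Bool.false_eq_true,
          List.nil_append]
        congr 1
        simp [pvF]

theorem pvSplit_firsts (cs : List Char) :
    pvF (PySem.Chars.split₀ cs) = pvFirsts cs true := by
  have := pvGo_firsts cs [] []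
  simpa [PySem.Chars.split₀, pvF] using this

-- B's foldl computes pvFirsts
theorem pvScan_firsts (cs : List Char) : ∀ (p : Bool) (out : List Char),
    (cs.foldl (fun (st : Bool × List Char) ch =>
      let ws := PySem.Chars.isspace ch
      (ws, if st.1 && !ws then st.2 ++ [PySem.Dict.getD pvLeetTable ch ch] else st.2))
      (p, out)).2 = out ++ pvFirsts cs p := by
  induction cs with
  | nil => intro p out; simp [pvFirsts]
  | cons c rest ih =>
    intro p out
    by_cases hws : PySem.Chars.isspace c
    · have := ih true out
      simp only [List.foldl_cons]
      simp only [hws] at this ⊢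
      simpa [pvFirsts, hws] using this
    · have hb : PySem.Chars.isspace c = false := by simpa using hws
      simp only [List.foldl_cons]
      cases p with
      | false =>
        have := ih false out
        simp only [hb] at this ⊢
        simpa [pvFirsts, hb] using this
      | true =>
        have := ih false (out ++ [PySem.Dict.getD pvLeetTable c c])
        simp only [hb] at this ⊢
        simpa [pvFirsts, hb] using this

-- A's loop step appends exactly the translated first letter (or nothing)
theorem pvStep_eq (password : List Char) (w : String) :
    (match PySem.List.pyGet? w.toList 0 with
     | none => password
     | some c =>
       if c = 'i' ∨ c = 'I' then password ++ ['1']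
       else if c = 'o' ∨ c = 'O' then password ++ ['0']
       else if c = 's' ∨ c = 'S' then password ++ ['5']
       else password ++ [c])
    = password ++ ((PySem.List.pyGet? w.toList 0).toList.map
        (fun c => PySem.Dict.getD pvLeetTable c c)) := by
  cases h : PySem.List.pyGet? w.toList 0 with
  | none => simp
  | some c =>
    simp only [Option.toList, List.map]
    rw [← pvLeet_char c]
    split_ifs <;> simp_all

-- ===== VERDICT =====
theorem make_password_spec : Claim_equal_make_password := by
  intro phrase _
  unfold Spec_make_password make_password make_password_alt
  have hA :
      (PySem.Str.split₀ phrase).foldl (fun password w =>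
        match PySem.List.pyGet? w.toList 0 with
        | none => password
        | some c =>
          if c = 'i' ∨ c = 'I' then password ++ ['1']
          else if c = 'o' ∨ c = 'O' then password ++ ['0']
          else if c = 's' ∨ c = 'S' then password ++ ['5']
          else password ++ [c]) []
      = pvFirsts phrase.toList true := by
    have hcongr :
        (PySem.Str.split₀ phrase).foldl (fun password w =>
          match PySem.List.pyGet? w.toList 0 with
          | none => password
          | some c =>
            if c = 'i' ∨ c = 'I' then password ++ ['1']
            else if c = 'o' ∨ c = 'O' then password ++ ['0']
            else if c = 's' ∨ c = 'S' then password ++ ['5']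
            else password ++ [c]) []
        = (PySem.Str.split₀ phrase).foldl (fun password w =>
            password ++ ((PySem.List.pyGet? w.toList 0).toList.map
              (fun c => PySem.Dict.getD pvLeetTable c c))) [] := by
      apply PySem.List.foldl_congr_mem
      intro acc w _
      exact pvStep_eq acc w
    rw [hcongr, PySem.List.foldl_append_eq_flatMap]
    rw [← pvSplit_firsts phrase.toList]
    simp [PySem.Str.split₀, pvF, PySem.List.pyGet?_zero, Option.toList_map, List.flatMap_map,
      List.head?_eq_getElem?]
  have hB := pvScan_firsts phrase.toList true []
  rw [hA]
  congr 1
  simpa using hB.symm
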